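-- pv_equiv track=rewrite | github.com/DrArtemi/ocr-cezam | file_types/document_identite.py | get_idx_term
-- ===== SOURCE A (Python) =====
-- def get_idx_term(row, idx, all_line=False):
--     cnt = 0
--     for i in range(len(row)):
--         if ':' in row[i]:
--             if idx == cnt and i+1 < len(row):
--                 return (' '.join(row[i+1:]) if all_line else row[i+1]), True
--             else:
--                 cnt += 1
--     return 'N/A', False
-- ===== SOURCE B (Python) =====
-- def get_idx_term(row, idx, all_line=False):
--     positions = [i for i in range(len(row)) if ':' in row[i]]
--     if 0 <= idx < len(positions) and positions[idx] + 1 < len(row):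
--         j = positions[idx] + 1
--         return (' '.join(row[j:]) if all_line else row[j]), True
--     return 'N/A', False
-- ===== Notes on version B (the rewrite author's own statement) =====
-- stated objective: alternative
-- what changed: Replaces the inline counter-with-early-return scan by first building the list of colon-containing indices and then doing one bounded indexed lookup.
import Mathlib
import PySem

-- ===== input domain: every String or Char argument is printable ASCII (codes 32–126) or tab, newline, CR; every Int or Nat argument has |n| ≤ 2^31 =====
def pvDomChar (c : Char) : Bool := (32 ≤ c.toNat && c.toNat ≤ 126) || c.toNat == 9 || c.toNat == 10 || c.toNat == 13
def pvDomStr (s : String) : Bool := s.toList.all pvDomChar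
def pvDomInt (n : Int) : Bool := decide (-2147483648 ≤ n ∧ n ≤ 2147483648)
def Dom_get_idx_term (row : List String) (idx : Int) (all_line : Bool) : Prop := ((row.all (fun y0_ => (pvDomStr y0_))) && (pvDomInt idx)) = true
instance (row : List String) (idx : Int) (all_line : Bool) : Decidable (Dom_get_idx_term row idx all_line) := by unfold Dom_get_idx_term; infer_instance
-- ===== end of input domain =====

-- B replaces A's counter-with-early-return scan by an index table of colon positions plus one bounded lookup (alternative decomposition, same cost).

-- ===== PORT A =====
-- A's index loop over range(len(row)) becomes the obvious structural recursion over
-- the remaining suffix with the same counter state; 'i+1 < len(row)' is 'xs ≠ []',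
-- row[i+1:] is xs, row[i+1] is xs.headD "".
def pvGoA (idx : Int) (all_line : Bool) : List String → Int → String × Bool
  | [], _ => ("N/A", false)
  | x :: xs, cnt =>
    if PySem.Str.isIn ":" x then
      if idx = cnt ∧ xs ≠ [] then
        ((if all_line then PySem.Str.join " " xs else xs.headD ""), true)
      else pvGoA idx all_line xs (cnt + 1)
    else pvGoA idx all_line xs cnt

def get_idx_term (row : List String) (idx : Int) (all_line : Bool) : String × Bool :=
  pvGoA idx all_line row 0

-- ===== PORT B =====
def get_idx_term_alt (row : List String) (idx : Int) (all_line : Bool) : String × Bool :=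
  let positions := (List.range row.length).filter (fun i => PySem.Str.isIn ":" (row.getD i ""))
  if 0 ≤ idx ∧ idx.toNat < positions.length ∧ positions.getD idx.toNat 0 + 1 < row.length then
    let j := positions.getD idx.toNat 0 + 1
    ((if all_line then PySem.Str.join " " (List.drop j row) else row.getD j ""), true)
  else ("N/A", false)

-- ===== PRECONDITION & SPEC =====
def Spec_get_idx_term (row : List String) (idx : Int) (all_line : Bool) (out : String × Bool) : Prop := out = get_idx_term_alt row idx all_line
instance (row : List String) (idx : Int) (all_line : Bool) (out : String × Bool) : Decidable (Spec_get_idx_term row idx all_line out) := by unfold Spec_get_idx_term; infer_instance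

-- ===== CLAIM (what is proved, stated in full; the proofs are below) =====
def Claim_equal_get_idx_term : Prop := ∀ (row : List String) (idx : Int) (all_line : Bool), Dom_get_idx_term row idx all_line → Spec_get_idx_term row idx all_line (get_idx_term row idx all_line)

-- ===== LEMMAS AND PROOFS =====

/-- The list of indices of colon-containing elements, structurally. -/
def posOf : List String → List Nat
  | [] => []
  | x :: xs => (if PySem.Str.isIn ":" x then [0] else []) ++ (posOf xs).map (· + 1)

lemma getD_map_add_one (l : List Nat) (n : Nat) (h : n < l.length) :
    (l.map (· + 1)).getD n 0 = l.getD n 0 + 1 := by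
  simp [List.getD, h]

lemma filter_range_eq_posOf (row : List String) :
    (List.range row.length).filter (fun i => PySem.Str.isIn ":" (row.getD i "")) = posOf row := by
  induction row with
  | nil => simp [posOf]
  | cons x xs ih =>
    have hr : List.range (x :: xs).length = 0 :: (List.range xs.length).map (· + 1) := by
      simp [List.length_cons, List.range_succ_eq_map]
    rw [hr]
    simp only [List.filter_cons, List.filter_map]
    have : ((List.range xs.length).filter
        ((fun i => PySem.Str.isIn ":" ((x :: xs).getD i "")) ∘ (· + 1))) =
        (List.range xs.length).filter (fun i => PySem.Str.isIn ":" (xs.getD i "")) := by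
      apply List.filter_congr
      intro i _
      simp [Function.comp]
    rw [this, ih]
    by_cases h : PySem.Str.isIn ":" x = true <;> simp_all [posOf]

/-- Characterisation of A's loop: starting at counter `cnt`, it finds the
`(idx - cnt)`-th colon position in the remaining suffix. -/
lemma goA_eq (idx : Int) (al : Bool) : ∀ (xs : List String) (cnt : Int),
    pvGoA idx al xs cnt =
      (if 0 ≤ idx - cnt ∧ (idx - cnt).toNat < (posOf xs).length ∧
          (posOf xs).getD (idx - cnt).toNat 0 + 1 < xs.length then
        ((if al then PySem.Str.join " " (List.drop ((posOf xs).getD (idx - cnt).toNat 0 + 1) xs)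
          else xs.getD ((posOf xs).getD (idx - cnt).toNat 0 + 1) ""), true)
      else ("N/A", false)) := by
  intro xs
  induction xs with
  | nil => intro cnt; simp [pvGoA, posOf]
  | cons x xs ih =>
    intro cnt
    by_cases hc : PySem.Str.isIn ":" x = true
    · have hc' : PySem.Chars.isIn [':'] x.toList = true := by simpa using hc
      have hpos : posOf (x :: xs) = 0 :: (posOf xs).map (· + 1) := by simp [posOf, hc']
      by_cases hm : idx = cnt ∧ xs ≠ []
      · -- immediate return
        obtain ⟨h1, h2⟩ := hm
        have hk : (idx - cnt).toNat = 0 := by omega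
        have hlp : 0 < xs.length := List.length_pos_of_ne_nil h2
        have hcond : 0 ≤ idx - cnt ∧ (idx - cnt).toNat < (posOf (x :: xs)).length ∧
            (posOf (x :: xs)).getD (idx - cnt).toNat 0 + 1 < (x :: xs).length := by
          refine ⟨by omega, ?_, ?_⟩
          · rw [hpos, hk]; simp
          · rw [hpos, hk]; simp; omega
        rw [pvGoA, if_pos hc, if_pos ⟨h1, h2⟩, if_pos hcond, hk, hpos]
        cases xs with
        | nil => simp at hlp
        | cons a as => simp
      · -- counter increments
        rw [pvGoA, if_pos hc, if_neg hm, ih (cnt + 1)]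
        by_cases hnn : 0 ≤ idx - (cnt + 1)
        · -- idx - cnt ≥ 1
          have hk1 : (idx - cnt).toNat = (idx - (cnt + 1)).toNat + 1 := by omega
          set k := (idx - (cnt + 1)).toNat with hkdef
          by_cases hlen : k < (posOf xs).length
          · have hgd : (posOf (x :: xs)).getD (idx - cnt).toNat 0 =
                (posOf xs).getD k 0 + 1 := by
              rw [hpos, hk1, List.getD_cons_succ, getD_map_add_one _ _ hlen]
            by_cases hbd : (posOf xs).getD k 0 + 1 < xs.length
            · have hcond : 0 ≤ idx - cnt ∧ (idx - cnt).toNat < (posOf (x :: xs)).length ∧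
                  (posOf (x :: xs)).getD (idx - cnt).toNat 0 + 1 < (x :: xs).length := by
                refine ⟨by omega, ?_, ?_⟩
                · rw [hpos, hk1]; simpa using Nat.succ_lt_succ (by simpa using hlen)
                · rw [hgd]; simp only [List.length_cons]; omega
              rw [if_pos ⟨hnn, hlen, hbd⟩, if_pos hcond, hgd]
              simp [List.drop_succ_cons]
            · rw [if_neg (by tauto), if_neg ?_]
              intro ⟨_, _, hb⟩
              rw [hgd] at hb
              simp only [List.length_cons] at hb
              omega
          · rw [if_neg (by tauto), if_neg ?_]
            intro ⟨_, hl, _⟩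
            rw [hpos, hk1] at hl
            simp at hl
            omega
        · -- idx - cnt ≤ 0 here; either idx = cnt with xs = [], or idx < cnt
          rw [if_neg (by omega)]
          by_cases h1 : idx = cnt
          · -- xs = [] (else hm would have held)
            have hxs : xs = [] := by
              by_contra hne
              exact hm ⟨h1, hne⟩
            subst hxs
            have hk : (idx - cnt).toNat = 0 := by omega
            rw [if_neg]
            intro ⟨_, _, hb⟩
            rw [hk, hpos] at hb
            simp [posOf] at hb
          · rw [if_neg (by omega)]
    · -- no colon: skip
      have hc' : ¬ PySem.Chars.isIn [':'] x.toList = true := by simpa using hc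
      rw [pvGoA, if_neg hc, ih cnt]
      have hpos : posOf (x :: xs) = (posOf xs).map (· + 1) := by simp [posOf, hc']
      set k := (idx - cnt).toNat with hkdef
      by_cases hnn : 0 ≤ idx - cnt
      · by_cases hlen : k < (posOf xs).length
        · have hgd : (posOf (x :: xs)).getD k 0 = (posOf xs).getD k 0 + 1 := by
            rw [hpos, getD_map_add_one _ _ hlen]
          by_cases hbd : (posOf xs).getD k 0 + 1 < xs.length
          · have hcond : 0 ≤ idx - cnt ∧ k < (posOf (x :: xs)).length ∧
                (posOf (x :: xs)).getD k 0 + 1 < (x :: xs).length := by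
              refine ⟨hnn, ?_, ?_⟩
              · rw [hpos]; simpa using hlen
              · rw [hgd]; simp only [List.length_cons]; omega
            rw [if_pos ⟨hnn, hlen, hbd⟩, if_pos hcond, hgd]
            simp [List.drop_succ_cons]
          · rw [if_neg (by tauto), if_neg ?_]
            intro ⟨_, _, hb⟩
            rw [hgd] at hb
            simp only [List.length_cons] at hb
            omega
        · rw [if_neg (by tauto), if_neg ?_]
          intro ⟨_, hl, _⟩
          rw [hpos] at hl
          simp at hl
          omega
      · rw [if_neg (by tauto), if_neg (by tauto)]

-- ===== VERDICT (by name: the statement is the Claim_ definition above) =====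
theorem get_idx_term_spec : Claim_equal_get_idx_term := by
  intro row idx al _
  unfold Spec_get_idx_term get_idx_term get_idx_term_alt
  rw [goA_eq, filter_range_eq_posOf]
  simp
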